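-- pv_equiv track=rewrite | github.com/Kurorororo/didp-models | m-pdtsp/mpdtsp_didp.py | compute_min_distance_to
-- ===== SOURCE A (Python) =====
-- def compute_min_distance_to(nodes, edges):
--     max_distance = max(edges.values())
--     result = [
--         min([max_distance] + [edges[i, j] for i in nodes if (i, j) in edges])
--         for j in nodes
--     ]
--     result[0] = 0
--
--     return result
-- ===== SOURCE B (Python) =====
-- def compute_min_distance_to(nodes, edges):
--     max_distance = max(edges.values())
--     node_set = set(nodes)
--     best = {}
--     for (i, j), w in edges.items():
--         if i in node_set and (j not in best or w < best[j]):
--             best[j] = w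
--     result = [best.get(j, max_distance) for j in nodes]
--     result[0] = 0
--     return result
-- ===== Notes on version B (the rewrite author's own statement) =====
-- stated objective: faster
-- what changed: A scans all candidate sources i in nodes for every target j (a nodes x nodes double loop with a dict lookup per pair); B makes a single pass over the edge dict accumulating the minimum incoming weight per target in a dictionary, then emits one lookup per node with max_distance as the default.
import Mathlib
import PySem

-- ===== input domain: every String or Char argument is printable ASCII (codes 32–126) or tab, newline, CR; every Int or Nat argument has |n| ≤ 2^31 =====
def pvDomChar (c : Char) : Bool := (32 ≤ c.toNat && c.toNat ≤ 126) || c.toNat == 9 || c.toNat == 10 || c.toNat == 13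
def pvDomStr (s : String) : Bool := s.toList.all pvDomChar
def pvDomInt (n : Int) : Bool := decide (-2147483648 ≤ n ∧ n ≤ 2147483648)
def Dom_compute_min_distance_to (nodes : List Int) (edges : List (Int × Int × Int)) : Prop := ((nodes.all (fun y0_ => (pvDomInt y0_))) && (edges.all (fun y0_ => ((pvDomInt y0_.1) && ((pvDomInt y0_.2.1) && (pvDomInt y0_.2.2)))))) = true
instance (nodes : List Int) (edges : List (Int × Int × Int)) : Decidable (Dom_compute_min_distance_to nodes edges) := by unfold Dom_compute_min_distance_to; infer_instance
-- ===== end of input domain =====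

-- B replaces A's nested scan over nodes×nodes by one pass over the edge dict accumulating the
-- per-target minimum, then a lookup per node (objective: faster).

-- ===== PORT A =====
-- the edges dict, rebuilt from its item list (insertion order, last value wins on a repeated key)
def pvEdgeDict (edges : List (Int × Int × Int)) : PySem.Dict (Int × Int) Int :=
  PySem.Dict.ofList (edges.map (fun e => ((e.1, e.2.1), e.2.2)))

def compute_min_distance_to (nodes : List Int) (edges : List (Int × Int × Int)) : List Int :=
  let d := pvEdgeDict edges
  match PySem.List.max? d.values (fun v => v) with
  | none => []      -- Python: max() of an empty dict raises ValueError; excluded by Pre_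
  | some max_distance =>
    let result := nodes.map (fun j =>
      (PySem.List.min? (max_distance :: nodes.filterMap (fun i =>
          if d.contains (i, j) then d.get? (i, j) else none)) (fun v => v)).getD 0)
      -- .getD 0 is unreachable here: the minimized list is nonempty, Python's min cannot raise
    match PySem.List.pySet? result 0 0 with
    | some r => r
    | none => []    -- Python: result[0] = 0 raises IndexError on empty nodes; excluded by Pre_

-- ===== PORT B =====
-- loop body of B: keep the smallest weight seen so far for each target j, source restricted to node_set
def pvBestStep (node_set : PySem.Set Int) (b : PySem.Dict Int Int) (p : (Int × Int) × Int) : PySem.Dict Int Int :=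
  if PySem.Set.contains node_set p.1.1 && (!(b.contains p.1.2) || p.2 < b.getD p.1.2 0)
  then b.insert p.1.2 p.2 else b

def compute_min_distance_to_alt (nodes : List Int) (edges : List (Int × Int × Int)) : List Int :=
  let d := pvEdgeDict edges
  match PySem.List.max? d.values (fun v => v) with
  | none => []      -- Python: max() of an empty dict raises ValueError; excluded by Pre_
  | some max_distance =>
    let node_set : PySem.Set Int := PySem.Set.ofList nodes
    let best := d.items.foldl (pvBestStep node_set) PySem.Dict.empty
    let result := nodes.map (fun j => best.getD j max_distance)
    match PySem.List.pySet? result 0 0 with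
    | some r => r
    | none => []    -- Python: result[0] = 0 raises IndexError on empty nodes; excluded by Pre_

-- ===== PRECONDITION & SPEC =====
-- Pre_ excludes exactly the raising inputs: empty edges (max() raises ValueError) and empty nodes
-- (result[0] = 0 raises IndexError); both Pythons raise there identically.
def Pre_compute_min_distance_to (nodes : List Int) (edges : List (Int × Int × Int)) : Prop :=
  nodes ≠ [] ∧ edges ≠ []
instance (nodes : List Int) (edges : List (Int × Int × Int)) : Decidable (Pre_compute_min_distance_to nodes edges) := by unfold Pre_compute_min_distance_to; infer_instance

def pvWitness_compute_min_distance_to : List Int × (List (Int × Int × Int)) :=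
  ([0, 1, 2], [(0, 1, 5), (1, 2, 3), (2, 1, 4)])

def Spec_compute_min_distance_to (nodes : List Int) (edges : List (Int × Int × Int)) (out : List Int) : Prop := out = compute_min_distance_to_alt nodes edges
instance (nodes : List Int) (edges : List (Int × Int × Int)) (out : List Int) : Decidable (Spec_compute_min_distance_to nodes edges out) := by unfold Spec_compute_min_distance_to; infer_instance

-- ===== CLAIM (what is proved, stated in full; the proofs are below) =====
def Claim_equal_compute_min_distance_to : Prop := ∀ (nodes : List Int) (edges : List (Int × Int × Int)), Dom_compute_min_distance_to nodes edges → Pre_compute_min_distance_to nodes edges → Spec_compute_min_distance_to nodes edges (compute_min_distance_to nodes edges)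

-- ===== LEMMAS AND PROOFS =====

-- option-min combining function: the effect of one relevant edge on best.get? j
def pvOm (o : Option Int) (y : Int) : Option Int :=
  match o with
  | none => some y
  | some v => some (min v y)

-- the weights of the items of l whose source is in node_set and whose target is j
def pvRelVals (node_set : PySem.Set Int) (l : List ((Int × Int) × Int)) (j : Int) : List Int :=
  (l.filter (fun p => PySem.Set.contains node_set p.1.1 && p.1.2 == j)).map (·.2)

theorem pvSetMem (s : PySem.Set Int) (x : Int) : PySem.Set.contains s x = true ↔ x ∈ s := by
  simp [PySem.Set.contains]

theorem pvStep_get? (node_set : PySem.Set Int) (b : PySem.Dict Int Int) (p : (Int × Int) × Int) (j : Int) :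
    (pvBestStep node_set b p).get? j =
      if PySem.Set.contains node_set p.1.1 && p.1.2 == j then pvOm (b.get? j) p.2 else b.get? j := by
  unfold pvBestStep
  by_cases hcj : (PySem.Set.contains node_set p.1.1 && p.1.2 == j) = true
  · rw [if_pos hcj]
    obtain ⟨hc, hj⟩ : PySem.Set.contains node_set p.1.1 = true ∧ p.1.2 = j := by
      simpa [Bool.and_eq_true] using hcj
    subst hj
    rw [hc, Bool.true_and]
    cases hg : b.get? p.1.2 with
    | none =>
      have hcont : b.contains p.1.2 = false := (PySem.Dict.get?_eq_none_iff_contains b p.1.2).mp hg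
      rw [hcont]
      simp [PySem.Dict.get?_insert_self, pvOm]
    | some v =>
      have hcont : b.contains p.1.2 = true := by
        rw [PySem.Dict.contains_eq_isSome_get?, hg]; rfl
      have hgd : b.getD p.1.2 0 = v := PySem.Dict.getD_of_get?_eq_some b 0 hg
      rw [hcont, hgd]
      by_cases hlt : p.2 < v
      · simp [hlt, PySem.Dict.get?_insert_self, pvOm, min_eq_right (le_of_lt hlt)]
      · simp [hlt, pvOm, hg, min_eq_left (le_of_not_gt hlt)]
  · rw [if_neg hcj]
    split
    · next hcond =>
      obtain ⟨hc, _⟩ := Bool.and_eq_true_iff.mp hcond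
      have hj : p.1.2 ≠ j := by
        intro h
        exact hcj (by rw [hc, h]; simp)
      exact PySem.Dict.get?_insert_of_ne b _ (fun h => hj h.symm)
    · rfl

theorem pvFold_get? (node_set : PySem.Set Int) (l : List ((Int × Int) × Int))
    (b : PySem.Dict Int Int) (j : Int) :
    (l.foldl (pvBestStep node_set) b).get? j = (pvRelVals node_set l j).foldl pvOm (b.get? j) := by
  induction l generalizing b with
  | nil => rfl
  | cons p t ih =>
    rw [List.foldl_cons, ih, pvStep_get?]
    unfold pvRelVals
    rw [List.filter_cons]
    by_cases h : (PySem.Set.contains node_set p.1.1 && p.1.2 == j) = true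
    · rw [if_pos h, if_pos h, List.map_cons, List.foldl_cons]
    · rw [if_neg h, if_neg h]

theorem pvOmFold_some (t : List Int) (a : Int) :
    t.foldl pvOm (some a) = some (t.foldl min a) := by
  induction t generalizing a with
  | nil => rfl
  | cons x t ih => simp [pvOm, ih]

-- membership in the A-side candidate list ↔ membership in the B-side relevant-value list
theorem pvMem_iff (nodes : List Int) (edges : List (Int × Int × Int)) (j y : Int) :
    (y ∈ nodes.filterMap (fun i =>
        if (pvEdgeDict edges).contains (i, j) then (pvEdgeDict edges).get? (i, j) else none)) ↔
      y ∈ pvRelVals (PySem.Set.ofList nodes) (pvEdgeDict edges).items j := by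
  have hnd : (pvEdgeDict edges).keys.Nodup := PySem.Dict.nodup_keys_ofList _
  constructor
  · intro hy
    rcases List.mem_filterMap.mp hy with ⟨i, hi, hif⟩
    by_cases hc : (pvEdgeDict edges).contains (i, j)
    · rw [if_pos hc] at hif
      have hmem : ((i, j), y) ∈ (pvEdgeDict edges).items :=
        PySem.Dict.mem_items_of_get?_eq_some _ hif
      unfold pvRelVals
      refine List.mem_map.mpr ⟨((i, j), y), List.mem_filter.mpr ⟨hmem, ?_⟩, rfl⟩
      simpa using hi
    · rw [if_neg hc] at hif; cases hif
  · intro hy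
    unfold pvRelVals at hy
    rcases List.mem_map.mp hy with ⟨p, hpf, hpy⟩
    rcases List.mem_filter.mp hpf with ⟨hpmem, hcond⟩
    obtain ⟨h1, h2⟩ := Bool.and_eq_true_iff.mp hcond
    have hij : p.1.2 = j := by simpa using h2
    have hin : p.1.1 ∈ nodes :=
      (PySem.Set.mem_ofList _ _).mp ((pvSetMem _ _).mp h1)
    have hget : (pvEdgeDict edges).get? (p.1.1, j) = some y := by
      have : p.1 = (p.1.1, j) := by rw [← hij]
      rw [← this, ← hpy]
      exact PySem.Dict.get?_of_mem_items _ (by simpa using hpmem) hnd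
    refine List.mem_filterMap.mpr ⟨p.1.1, hin, ?_⟩
    have hc : (pvEdgeDict edges).contains (p.1.1, j) = true := by
      rw [PySem.Dict.contains_eq_isSome_get?, hget]; rfl
    rw [if_pos hc, hget]

-- weights of relevant items are dict values, hence bounded by the maximum
theorem pvRel_le_max (nodes : List Int) (edges : List (Int × Int × Int)) (m j y : Int)
    (hm : PySem.List.max? (pvEdgeDict edges).values (fun v => v) = some m)
    (hy : y ∈ pvRelVals (PySem.Set.ofList nodes) (pvEdgeDict edges).items j) :
    y ≤ m := by
  unfold pvRelVals at hy
  rcases List.mem_map.mp hy with ⟨p, hpf, hpy⟩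
  have hpmem : p ∈ (pvEdgeDict edges).items := (List.mem_filter.mp hpf).1
  have hv : y ∈ (pvEdgeDict edges).values := by
    simp only [PySem.Dict.values]
    exact List.mem_map.mpr ⟨p, hpmem, hpy⟩
  exact PySem.List.max?_isMax hm y hv

-- the pointwise equality of the two per-node values
theorem pvPointwise (nodes : List Int) (edges : List (Int × Int × Int)) (m j : Int)
    (hm : PySem.List.max? (pvEdgeDict edges).values (fun v => v) = some m) :
    (PySem.List.min? (m :: nodes.filterMap (fun i =>
        if (pvEdgeDict edges).contains (i, j) then (pvEdgeDict edges).get? (i, j) else none))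
        (fun v => v)).getD 0 =
    ((pvEdgeDict edges).items.foldl (pvBestStep (PySem.Set.ofList nodes)) PySem.Dict.empty).getD j m := by
  set cand := nodes.filterMap (fun i =>
      if (pvEdgeDict edges).contains (i, j) then (pvEdgeDict edges).get? (i, j) else none) with hcand
  rw [PySem.List.min?_id_cons, Option.getD_some]
  rw [PySem.Dict.getD_eq_get?_getD, pvFold_get?, PySem.Dict.get?_empty]
  cases hrel : pvRelVals (PySem.Set.ofList nodes) (pvEdgeDict edges).items j with
  | nil =>
    have hcnil : cand = [] := by
      cases hc : cand with
      | nil => rfl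
      | cons a t =>
        exfalso
        have ha : a ∈ pvRelVals (PySem.Set.ofList nodes) (pvEdgeDict edges).items j :=
          (pvMem_iff nodes edges j a).mp (by rw [← hcand, hc]; exact List.mem_cons_self ..)
        rw [hrel] at ha; cases ha
    simp [hcnil]
  | cons x t =>
    rw [List.foldl_cons]
    show List.foldl min m cand = (List.foldl pvOm (pvOm none x) t).getD m
    rw [show pvOm none x = some x from rfl, pvOmFold_some, Option.getD_some]
    have hA := PySem.List.foldl_min_le cand m
    have hB := PySem.List.foldl_min_le t x
    have hBmem := PySem.List.foldl_min_mem t x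
    have hxrel : ∀ y ∈ x :: t, y ∈ cand := fun y hy =>
      (pvMem_iff nodes edges j y).mpr (by rw [hrel]; exact hy)
    have hcrel : ∀ y ∈ cand, y ∈ x :: t := fun y hy => by
      have h := (pvMem_iff nodes edges j y).mp hy
      rwa [hrel] at h
    apply le_antisymm
    · have hin : List.foldl min x t ∈ cand := by
        rcases hBmem with h | h
        · exact hxrel _ (by rw [h]; exact List.mem_cons_self ..)
        · exact hxrel _ (List.mem_cons_of_mem _ h)
      exact hA.2 _ hin
    · rcases PySem.List.foldl_min_mem cand m with h | h
      · rw [h]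
        rcases hBmem with h2 | h2
        · exact pvRel_le_max nodes edges m j _ hm (by rw [hrel, h2]; exact List.mem_cons_self ..)
        · exact pvRel_le_max nodes edges m j _ hm (by rw [hrel]; exact List.mem_cons_of_mem _ h2)
      · have h3 := hcrel _ h
        rcases List.mem_cons.mp h3 with h2 | h2
        · rw [h2]; exact hB.1
        · exact hB.2 _ h2

-- ===== VERDICT (by name: the statement is the Claim_ definition above) =====
theorem compute_min_distance_to_spec : Claim_equal_compute_min_distance_to := by
  intro nodes edges _ _
  show compute_min_distance_to nodes edges = compute_min_distance_to_alt nodes edges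
  unfold compute_min_distance_to compute_min_distance_to_alt
  cases hm : PySem.List.max? (pvEdgeDict edges).values (fun v => v) with
  | none => simp [hm]
  | some m =>
    have hmap : (nodes.map (fun j =>
        (PySem.List.min? (m :: nodes.filterMap (fun i =>
            if (pvEdgeDict edges).contains (i, j) then (pvEdgeDict edges).get? (i, j) else none))
          (fun v => v)).getD 0))
        = nodes.map (fun j =>
            ((pvEdgeDict edges).items.foldl (pvBestStep (PySem.Set.ofList nodes)) PySem.Dict.empty).getD j m) :=
      List.map_congr_left (fun j _ => pvPointwise nodes edges m j hm)
    simp only [hm, hmap]
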